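-- pv_equiv track=rewrite | github.com/5813gg/magenta | magenta/models/rl_rnn/melody_q.py | detect_low_unique
-- ===== SOURCE A (Python) =====
-- NOTE_OFF = 0
--
-- NO_EVENT = 1
--
-- def detect_low_unique(composition):
--   """Checks a composition to see if the lowest note within it is repeated.
--
--   Args:
--     composition: A list of integers representing the notes in the piece.
--   Returns:
--     True if the lowest note was unique, False otherwise.
--   """
--   no_special_events = [x for x in composition
--                        if x != NO_EVENT and x != NOTE_OFF]
--   if no_special_events:
--     min_note = min(no_special_events)
--     if composition.count(min_note) == 1:
--       return True
--   return False
-- ===== SOURCE B (Python) =====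
-- NOTE_OFF = 0
--
-- NO_EVENT = 1
--
-- def detect_low_unique(composition):
--   """Single pass: track the lowest non-special note and how often it occurs."""
--   min_note = None
--   count = 0
--   for x in composition:
--     if x == NO_EVENT or x == NOTE_OFF:
--       continue
--     if min_note is None or x < min_note:
--       min_note = x
--       count = 1
--     elif x == min_note:
--       count += 1
--   return min_note is not None and count == 1
-- ===== Notes on version B (the rewrite author's own statement) =====
-- stated objective: alternative
-- what changed: Replaces the three passes (filter, min, list.count) by one loop that maintains the current minimum non-special note and its multiplicity.
import Mathlib
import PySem

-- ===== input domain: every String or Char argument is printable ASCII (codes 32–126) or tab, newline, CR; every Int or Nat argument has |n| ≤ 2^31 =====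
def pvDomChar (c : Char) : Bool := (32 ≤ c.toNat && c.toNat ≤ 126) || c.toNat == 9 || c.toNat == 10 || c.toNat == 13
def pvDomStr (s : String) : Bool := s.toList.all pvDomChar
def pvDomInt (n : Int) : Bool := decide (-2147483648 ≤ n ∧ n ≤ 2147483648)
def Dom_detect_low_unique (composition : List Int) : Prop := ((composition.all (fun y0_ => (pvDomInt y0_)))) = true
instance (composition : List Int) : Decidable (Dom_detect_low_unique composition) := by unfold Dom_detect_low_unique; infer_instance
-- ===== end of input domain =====

-- B replaces A's three passes (filter, min, count) by one loop maintaining the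
-- current lowest non-special note and its multiplicity (objective: alternative single-pass algorithm).

-- ===== PORT A =====
def detect_low_unique (composition : List Int) : Bool :=
  let no_special_events := composition.filter (fun x => !(x == 1) && !(x == 0))
  if !no_special_events.isEmpty then
    match PySem.List.min? no_special_events (fun x => x) with
    | some min_note => if PySem.List.count composition min_note == 1 then true else false
    | none => false
  else false

-- ===== PORT B =====
def pvStepB (st : Option Int × Int) (x : Int) : Option Int × Int :=
  if x == 1 || x == 0 then st
  else match st with
    | (none, _) => (some x, 1)
    | (some m, c) =>
      if x < m then (some x, 1)
      else if x == m then (some m, c + 1)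
      else (some m, c)

def detect_low_unique_alt (composition : List Int) : Bool :=
  let st := composition.foldl pvStepB (none, 0)
  st.1.isSome && st.2 == 1

-- ===== PRECONDITION & SPEC =====
def Spec_detect_low_unique (composition : List Int) (out : Bool) : Prop := out = detect_low_unique_alt composition
instance (composition : List Int) (out : Bool) : Decidable (Spec_detect_low_unique composition out) := by unfold Spec_detect_low_unique; infer_instance

-- ===== CLAIM (what is proved, stated in full; the proofs are below) =====
def Claim_equal_detect_low_unique : Prop := ∀ (composition : List Int), Dom_detect_low_unique composition → Spec_detect_low_unique composition (detect_low_unique composition)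

-- ===== LEMMAS AND PROOFS =====

-- the B-step restricted to non-special notes
def pvStepB' (st : Option Int × Int) (x : Int) : Option Int × Int :=
  match st with
  | (none, _) => (some x, 1)
  | (some m, c) =>
    if x < m then (some x, 1)
    else if x == m then (some m, c + 1)
    else (some m, c)

lemma foldl_stepB_filter (l : List Int) (s : Option Int × Int) :
    l.foldl pvStepB s = (l.filter (fun x => !(x == 1) && !(x == 0))).foldl pvStepB' s := by
  induction l generalizing s with
  | nil => rfl
  | cons y t ih =>
    by_cases hy : y = 1 ∨ y = 0
    · have h1 : pvStepB s y = s := by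
        simp [pvStepB]; omega
      simp [List.foldl_cons, List.filter_cons, h1, ih]
      rcases hy with h | h <;> simp [h]
    · push Not at hy
      have h1 : pvStepB s y = pvStepB' s y := by
        simp [pvStepB, pvStepB']
        omega
      simp [List.foldl_cons, h1, ih, hy]

lemma foldl_min_le_init (t : List Int) (z : Int) : t.foldl min z ≤ z := by
  induction t generalizing z with
  | nil => simp
  | cons a s ihs => exact le_trans (ihs (min z a)) (min_le_left _ _)

lemma foldl_min_mem (t : List Int) (z : Int) : t.foldl min z ∈ z :: t := by
  induction t generalizing z with
  | nil => simp
  | cons a s ihs =>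
    rw [List.foldl_cons]
    rcases List.mem_cons.mp (ihs (min z a)) with h | h
    · rw [h]
      rcases min_choice z a with hc | hc <;> rw [hc] <;> simp
    · simp [List.mem_cons, h]

lemma foldl_stepB'_some (ys : List Int) (m : Int) (c : Int) :
    ys.foldl pvStepB' (some m, c) =
      (some (ys.foldl min m),
       if ys.foldl min m < m then (ys.count (ys.foldl min m) : Int)
       else c + (ys.count m : Int)) := by
  induction ys generalizing m c with
  | nil => simp
  | cons y t ih =>
    rcases lt_trichotomy y m with h | h | h
    · have hy : pvStepB' (some m, c) y = (some y, 1) := by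
        simp [pvStepB']; omega
      have hmin : min m y = y := by omega
      have hM : t.foldl min y < m := lt_of_le_of_lt (foldl_min_le_init t y) h
      rw [List.foldl_cons, hy, ih, List.foldl_cons, hmin]
      by_cases hMy : t.foldl min y < y
      · have hne : y ≠ t.foldl min y := by omega
        simp [hM, hMy, hne]
      · have heq : t.foldl min y = y := le_antisymm (foldl_min_le_init t y) (not_lt.mp hMy)
        simp [heq, h]
        omega
    · have hy : pvStepB' (some m, c) y = (some m, c + 1) := by
        simp [pvStepB', h]
      have hmin : min m y = m := by omega
      rw [List.foldl_cons, hy, ih, List.foldl_cons, hmin]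
      by_cases hM : t.foldl min m < m
      · have hne : y ≠ t.foldl min m := by omega
        simp [hM, hne]
      · have heq : t.foldl min m = m := le_antisymm (foldl_min_le_init t m) (not_lt.mp hM)
        simp [heq, h]
        omega
    · have hn1 : ¬ y < m := by omega
      have hn2 : y ≠ m := by omega
      have hy : pvStepB' (some m, c) y = (some m, c) := by
        simp [pvStepB', hn1, hn2]
      have hmin : min m y = m := by omega
      rw [List.foldl_cons, hy, ih, List.foldl_cons, hmin]
      have hyne : y ≠ t.foldl min m := by
        have := foldl_min_le_init t m; omega
      by_cases hM : t.foldl min m < m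
      · simp [hM, hyne]
      · simp [hM, hn2]

lemma count_filter_eq (l : List Int) (m : Int) (h1 : m ≠ 1) (h0 : m ≠ 0) :
    (l.filter (fun x => !(x == 1) && !(x == 0))).count m = l.count m := by
  induction l with
  | nil => rfl
  | cons y t ih =>
    by_cases hy : y = m
    · subst hy
      simp [h1, h0, ih]
    · by_cases hs : (!(y == 1) && !(y == 0)) = true
      · simp [hs, hy, ih]
      · simp [hs, hy, ih]

-- ===== VERDICT (by name: the statement is the Claim_ definition above) =====
theorem detect_low_unique_spec : Claim_equal_detect_low_unique := by
  intro composition _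
  unfold Spec_detect_low_unique detect_low_unique detect_low_unique_alt
  rw [foldl_stepB_filter]
  cases hys : composition.filter (fun x => !(x == 1) && !(x == 0)) with
  | nil => simp
  | cons z t =>
    have hz : z ∈ composition.filter (fun x => !(x == 1) && !(x == 0)) := by
      rw [hys]; exact List.mem_cons_self
    have hM : t.foldl min z ∈ z :: t := foldl_min_mem t z
    have hMf : t.foldl min z ∈ composition.filter (fun x => !(x == 1) && !(x == 0)) := by
      rw [hys]; exact hM
    have hp := List.of_mem_filter hMf
    have h1 : t.foldl min z ≠ 1 := by simpa using (Bool.and_elim_left hp)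
    have h0 : t.foldl min z ≠ 0 := by simpa using (Bool.and_elim_right hp)
    have hcnt : (z :: t).count (t.foldl min z) = composition.count (t.foldl min z) := by
      rw [← hys]; exact count_filter_eq _ _ h1 h0
    simp only [List.isEmpty_cons, Bool.not_false, if_true, PySem.List.min?_id_cons]
    rw [List.foldl_cons]
    have hstep : pvStepB' ((none : Option Int), (0 : Int)) z = (some z, 1) := by rfl
    rw [hstep, foldl_stepB'_some]
    rw [PySem.List.count_eq, ← hcnt]
    by_cases hlt : t.foldl min z < z
    · have hne : z ≠ t.foldl min z := by omega
      simp [hlt, hne]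
      exact decide_eq_decide.mpr (by omega)
    · have heq : t.foldl min z = z := le_antisymm (foldl_min_le_init t z) (not_lt.mp hlt)
      simp [heq]
      exact decide_eq_decide.mpr (by omega)
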